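-- pv_equiv track=rewrite | github.com/K-Jay9/leetcode-python | two chocolates.py | solution
-- ===== SOURCE A (Python) =====
-- def solution(prices, money):
--     prices = [i for i in prices if i < money]
--     if len(prices) < 2:
--         return money
--     prices.sort()
--     res = []
--     for i in range(len(prices)-1):
--         left = money - prices[i]
--         del prices[i]
--         res = [i for i in prices if left-i >= 0]
--         if len(res) == 0:
--             return money
--         for j in res:
--             if left-j >= 0:
--                 return left-j
-- ===== SOURCE B (Python) =====
-- def solution(prices, money):
--     min1 = None  # smallest price seen that is < money
--     min2 = None  # second smallest such price
--     count = 0    # how many prices are < money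
--     for p in prices:
--         if p < money:
--             count += 1
--             if min1 is None or p < min1:
--                 min2 = min1
--                 min1 = p
--             elif min2 is None or p < min2:
--                 min2 = p
--     if count < 2:
--         return money
--     if min1 + min2 <= money:
--         return money - min1 - min2
--     return money
-- ===== Notes on version B (the rewrite author's own statement) =====
-- stated objective: alternative
-- what changed: Replaces A's filter+sort+loop-with-deletion-and-inner-rescans by a single O(n) pass that maintains the two smallest eligible prices and a count in three variables, with no sorting and no list mutation; interpreted-Python overhead makes it no faster on the clock than A's C-implemented sort.
import Mathlib
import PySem

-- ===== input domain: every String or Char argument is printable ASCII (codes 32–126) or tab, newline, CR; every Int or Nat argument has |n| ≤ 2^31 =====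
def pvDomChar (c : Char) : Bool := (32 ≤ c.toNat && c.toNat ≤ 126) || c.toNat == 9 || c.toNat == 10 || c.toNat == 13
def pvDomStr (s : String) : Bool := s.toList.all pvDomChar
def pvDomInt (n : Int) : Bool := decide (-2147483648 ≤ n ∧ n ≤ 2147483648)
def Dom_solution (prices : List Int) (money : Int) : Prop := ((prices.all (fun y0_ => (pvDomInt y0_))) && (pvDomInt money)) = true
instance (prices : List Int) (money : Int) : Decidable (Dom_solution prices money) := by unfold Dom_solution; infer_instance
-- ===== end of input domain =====

-- B replaces A's filter+sort+delete-and-rescan by a single scan tracking the two smallest eligible prices and a count; A mutates only its local copy, so return values are the whole story.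


-- ===== PORT A =====
-- inner 'for j in res: if left-j >= 0: return left-j' (none = loop fell through)
def solInner (left : Int) : List Int → Option Int
  | [] => none
  | j :: js => if left - j ≥ 0 then some (left - j) else solInner left js

-- outer 'for i in range(len(prices)-1)' with the mutating list ps; none = loop ended (Python would return None) or IndexError — both unreachable on the calls solution makes
def solOuter (money : Int) (ps : List Int) : List Int → Option Int
  | [] => none
  | i :: is =>
    match PySem.List.pyGet? ps i with
    | none => none
    | some pi =>
      let left := money - pi
      match PySem.List.pop? ps i with      -- del prices[i]
      | none => none
      | some (_, ps') =>
        let res := ps'.filter (fun x => decide (left - x ≥ 0))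
        if res.isEmpty then some money
        else
          match solInner left res with
          | some v => some v
          | none => solOuter money ps' is

def solution (prices : List Int) (money : Int) : Int :=
  let prices1 := prices.filter (fun i => decide (i < money))
  if prices1.length < 2 then money
  else
    let sortedPrices := PySem.List.sorted prices1 (id : Int → Int) false
    match solOuter money sortedPrices (PySem.List.pyRange 0 ((sortedPrices.length : Int) - 1) 1) with
    | some v => v
    | none => 0   -- unreachable: the first outer iteration always returns

-- ===== PORT B =====
-- one step of the scan: state = (min1, min2, count)
def solStep (money : Int) (st : Option Int × Option Int × Int) (p : Int) : Option Int × Option Int × Int :=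
  if p < money then
    match st with
    | (m1, m2, c) =>
      match m1 with
      | none => (some p, m1, c + 1)
      | some a =>
        if p < a then (some p, some a, c + 1)
        else
          match m2 with
          | none => (some a, some p, c + 1)
          | some b => if p < b then (some a, some p, c + 1) else (some a, some b, c + 1)
  else st

def solution_alt (prices : List Int) (money : Int) : Int :=
  match prices.foldl (solStep money) (none, none, 0) with
  | (m1, m2, c) =>
    if c < 2 then money
    else
      match m1, m2 with
      | some a, some b => if a + b ≤ money then money - a - b else money
      | _, _ => money   -- unreachable: count ≥ 2 forces both to be set

-- ===== PRECONDITION & SPEC =====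
def Spec_solution (prices : List Int) (money : Int) (out : Int) : Prop := out = solution_alt prices money
instance (prices : List Int) (money : Int) (out : Int) : Decidable (Spec_solution prices money out) := by unfold Spec_solution; infer_instance

-- ===== CLAIM (what is proved, stated in full; the proofs are below) =====
def Claim_equal_solution : Prop := ∀ (prices : List Int) (money : Int), Dom_solution prices money → Spec_solution prices money (solution prices money)

-- ===== LEMMAS AND PROOFS =====

-- "a and b are the two smallest values of l (with multiplicity)"
def TwoSmallest (l : List Int) (a b : Int) : Prop :=
  ∃ t, l.Perm (a :: b :: t) ∧ a ≤ b ∧ ∀ x ∈ t, b ≤ x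

-- the invariant of B's scan: F is the list of eligible prices processed so far
def StInv (F : List Int) (st : Option Int × Option Int × Int) : Prop :=
  st.2.2 = (F.length : Int) ∧
  ((F = [] ∧ st.1 = none ∧ st.2.1 = none) ∨
   ((∃ a, F = [a] ∧ st.1 = some a ∧ st.2.1 = none)) ∨
   (2 ≤ F.length ∧ ∃ a b, st.1 = some a ∧ st.2.1 = some b ∧ TwoSmallest F a b))

theorem stInv_step (money : Int) (F : List Int) (st : Option Int × Option Int × Int) (x : Int)
    (hx : x < money) (h : StInv F st) : StInv (F ++ [x]) (solStep money st x) := by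
  obtain ⟨m1, m2, c⟩ := st
  obtain ⟨hc, hcase⟩ := h
  simp only at hc
  rcases hcase with ⟨hF, h1, h2⟩ | ⟨a, hF, h1, h2⟩ | ⟨hlen, a, b, h1, h2, t, hperm, hab, hbd⟩
  · subst hF h1 h2
    refine ⟨by simp [solStep, hx, hc], Or.inr (Or.inl ⟨x, by simp [solStep, hx]⟩)⟩
  · subst hF h1 h2
    by_cases hxa : x < a
    · exact ⟨by simp [solStep, hx, hxa, hc],
        Or.inr (Or.inr ⟨by simp, x, a, by simp [solStep, hx, hxa],
          by simp [solStep, hx, hxa], [], List.perm_append_singleton x [a], le_of_lt hxa, by simp⟩)⟩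
    · exact ⟨by simp [solStep, hx, hxa, hc],
        Or.inr (Or.inr ⟨by simp, a, x, by simp [solStep, hx, hxa],
          by simp [solStep, hx, hxa], [], List.Perm.refl _, by omega, by simp⟩)⟩
  · subst h1 h2
    have hperm' : (F ++ [x]).Perm (x :: a :: b :: t) :=
      (List.perm_append_singleton x F).trans (hperm.cons x)
    by_cases hxa : x < a
    · refine ⟨by simp [solStep, hx, hxa, hc], Or.inr (Or.inr ⟨by simp; omega, x, a,
        by simp [solStep, hx, hxa], by simp [solStep, hx, hxa], b :: t,
        hperm', by omega, ?_⟩)⟩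
      intro y hy
      rcases List.mem_cons.mp hy with rfl | hy
      · exact hab
      · exact le_trans hab (hbd y hy)
    · by_cases hxb : x < b
      · refine ⟨by simp [solStep, hx, hxa, hxb, hc], Or.inr (Or.inr ⟨by simp; omega, a, x,
          by simp [solStep, hx, hxa, hxb], by simp [solStep, hx, hxa, hxb], b :: t,
          hperm'.trans (List.Perm.swap a x (b :: t)), by omega, ?_⟩)⟩
        intro y hy
        rcases List.mem_cons.mp hy with rfl | hy
        · exact le_of_lt hxb
        · exact le_trans (le_of_lt hxb) (hbd y hy)
      · refine ⟨by simp [solStep, hx, hxa, hxb, hc], Or.inr (Or.inr ⟨by simp; omega, a, b,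
          by simp [solStep, hx, hxa, hxb], by simp [solStep, hx, hxa, hxb], x :: t,
          hperm'.trans ?_, hab, ?_⟩)⟩
        · exact (List.Perm.swap a x (b :: t)).trans ((List.Perm.swap b x t).cons a)
        · intro y hy
          rcases List.mem_cons.mp hy with rfl | hy
          · omega
          · exact hbd y hy

theorem stInv_foldl (money : Int) (l : List Int) (F : List Int)
    (st : Option Int × Option Int × Int) (h : StInv F st) :
    StInv (F ++ l.filter (fun i => decide (i < money))) (l.foldl (solStep money) st) := by
  induction l generalizing F st with
  | nil => simpa using h
  | cons x xs ih =>
    by_cases hx : x < money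
    · have := ih (F ++ [x]) (solStep money st x) (stInv_step money F st x hx h)
      simpa [hx, List.append_assoc] using this
    · have hstep : solStep money st x = st := by simp [solStep, hx]
      simpa [hx, hstep] using ih F st h

-- the two smallest values are unique
theorem twoSmallest_unique {l : List Int} {a b a' b' : Int}
    (h1 : TwoSmallest l a b) (h2 : TwoSmallest l a' b') : a = a' ∧ b = b' := by
  obtain ⟨t, hp, hab, hbd⟩ := h1
  obtain ⟨t', hp', hab', hbd'⟩ := h2
  have hmem : ∀ x ∈ l, a ≤ x := by
    intro x hx
    rcases List.mem_cons.mp (hp.subset hx) with rfl | hx'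
    · exact le_refl _
    rcases List.mem_cons.mp hx' with rfl | hx''
    · exact hab
    · exact le_trans hab (hbd x hx'')
  have hmem' : ∀ x ∈ l, a' ≤ x := by
    intro x hx
    rcases List.mem_cons.mp (hp'.subset hx) with rfl | hx'
    · exact le_refl _
    rcases List.mem_cons.mp hx' with rfl | hx''
    · exact hab'
    · exact le_trans hab' (hbd' x hx'')
  have ha : a = a' := le_antisymm
    (hmem a' (hp'.mem_iff.mpr (by simp)))
    (hmem' a (hp.mem_iff.mpr (by simp)))
  subst ha
  have he : (b :: t).Perm (b' :: t') := (hp.symm.trans hp').cons_inv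
  refine ⟨rfl, le_antisymm ?_ ?_⟩
  · rcases List.mem_cons.mp (he.symm.subset (List.mem_cons_self ..)) with h | h
    · omega
    · exact hbd b' h
  · rcases List.mem_cons.mp (he.subset (List.mem_cons_self ..)) with h | h
    · omega
    · exact hbd' b h

-- A's sorted head pair is the two smallest
theorem sorted_twoSmallest {F : List Int} {a b : Int} {t : List Int}
    (hs : PySem.List.sorted F (id : Int → Int) false = a :: b :: t) :
    TwoSmallest F a b := by
  have hperm := PySem.List.sorted_perm F (id : Int → Int) false
  have hpw := PySem.List.sorted_pairwise F (id : Int → Int)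
  rw [hs] at hperm hpw
  refine ⟨t, hperm.symm, ?_, ?_⟩
  · simpa using (List.pairwise_cons.mp hpw).1 b (by simp)
  · intro x hx
    simpa using (List.pairwise_cons.mp (List.pairwise_cons.mp hpw).2).1 x hx

-- ===== VERDICT (by name: the statement is the Claim_ definition above) =====
theorem solution_eval : ∀ (prices : List Int) (money : Int),
    solution prices money = solution_alt prices money := by
  intro prices money
  rcases hfold : prices.foldl (solStep money) (none, none, (0:Int)) with ⟨m1, m2, c⟩
  have hB := stInv_foldl money prices [] (none, none, (0:Int)) ⟨rfl, Or.inl ⟨rfl, rfl, rfl⟩⟩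
  rw [List.nil_append, hfold] at hB
  obtain ⟨hc, hcase⟩ := hB
  simp only at hc
  by_cases hlen : (prices.filter (fun i => decide (i < money))).length < 2
  · have hc2 : c < 2 := by omega
    simp [solution, solution_alt, hfold, hlen, hc2]
  · rcases hcase with ⟨h1, _, _⟩ | ⟨a, h1, _, _⟩ | ⟨_, a', b', hm1, hm2, hTS⟩
    · exact absurd (by simp [h1]) hlen
    · exact absurd (by simp [h1]) hlen
    subst hm1; subst hm2
    rcases hs : PySem.List.sorted (prices.filter (fun i => decide (i < money))) (id : Int → Int) false
        with _ | ⟨a, _ | ⟨b, t⟩⟩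
    · have hl := PySem.List.length_sorted (prices.filter (fun i => decide (i < money))) (id : Int → Int) false
      rw [hs] at hl; simp at hl; omega
    · have hl := PySem.List.length_sorted (prices.filter (fun i => decide (i < money))) (id : Int → Int) false
      rw [hs] at hl; simp at hl; omega
    · obtain ⟨ha, hb⟩ := twoSmallest_unique (sorted_twoSmallest hs) hTS
      subst ha; subst hb
      have hnc2 : ¬ c < 2 := by
        have := PySem.List.length_sorted (prices.filter (fun i => decide (i < money))) (id : Int → Int) false
        rw [hs] at this; simp at this; omega
      have hrange : PySem.List.pyRange 0 (((a :: b :: t).length : Int) - 1) 1 =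
          0 :: PySem.List.pyRange (0 + 1) (((a :: b :: t).length : Int) - 1) 1 := by
        rw [PySem.List.pyRange_one_cons (by simp)]
      by_cases hab : a + b ≤ money
      · have houter : solOuter money (a :: b :: t)
            (0 :: PySem.List.pyRange (0 + 1) (((a :: b :: t).length : Int) - 1) 1) = some (money - a - b) := by
          simp only [solOuter, PySem.List.pyGet?_zero_cons, PySem.List.pop?_zero_cons]
          simp [solInner, show b ≤ money - a by omega]
        simp only [solution, solution_alt, hfold, if_neg hlen, if_neg hnc2, hs, hrange, houter,
          if_pos hab]
      · have hfilt : t.filter (fun x => decide (x ≤ money - a)) = [] := by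
          rw [List.filter_eq_nil_iff]
          intro x hx
          obtain ⟨t', hp', _, hbd'⟩ := hTS
          -- x ∈ t, tail of the sorted list, so b ≤ x
          have hpw := PySem.List.sorted_pairwise (prices.filter (fun i => decide (i < money))) (id : Int → Int)
          rw [hs] at hpw
          have hbx : b ≤ x := by
            simpa using (List.pairwise_cons.mp (List.pairwise_cons.mp hpw).2).1 x hx
          simp; omega
        have houter : solOuter money (a :: b :: t)
            (0 :: PySem.List.pyRange (0 + 1) (((a :: b :: t).length : Int) - 1) 1) = some money := by
          simp [solOuter, hfilt, show ¬ b ≤ money - a by omega]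
        simp only [solution, solution_alt, hfold, if_neg hlen, if_neg hnc2, hs, hrange, houter]
        simp [hab]

-- ===== VERDICT (by name: the statement is the Claim_ definition above) =====
theorem solution_spec : Claim_equal_solution := by
  intro prices money _
  exact solution_eval prices money
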